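-- pv_equiv track=rewrite | github.com/miliar/Code_Jam_Webscraper | Solutions_python/Problem_200/995.py | simpleTidy
-- ===== SOURCE A (Python) =====
-- def simpleTidy(N):
--     digits=[x for x in list(str(N))]
--     biggestLast="9"
--     current=0
--     for i in range(0, len(digits)):
--         j=len(digits)-1-i
--         largestPossible=min(biggestLast, digits[j])
--         biggestLast=largestPossible
--         current+=int(largestPossible)*(10**i)
--     return current
-- ===== SOURCE B (Python) =====
-- def simpleTidy(N):
--     digits = list(str(N))
--     d = len(digits)
--     total = 0
--     for j in range(d):
--         m = digits[j]
--         for k in range(j + 1, d):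
--             if digits[k] < m:
--                 m = digits[k]
--         total = total * 10 + int(m)
--     return total
-- ===== Notes on version B (the rewrite author's own statement) =====
-- stated objective: alternative
-- what changed: Replaces A's single right-to-left running-minimum pass with per-digit powers of 10 by a per-position suffix-minimum nested scan combined with left-to-right Horner reconstruction of the number.
import Mathlib
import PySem

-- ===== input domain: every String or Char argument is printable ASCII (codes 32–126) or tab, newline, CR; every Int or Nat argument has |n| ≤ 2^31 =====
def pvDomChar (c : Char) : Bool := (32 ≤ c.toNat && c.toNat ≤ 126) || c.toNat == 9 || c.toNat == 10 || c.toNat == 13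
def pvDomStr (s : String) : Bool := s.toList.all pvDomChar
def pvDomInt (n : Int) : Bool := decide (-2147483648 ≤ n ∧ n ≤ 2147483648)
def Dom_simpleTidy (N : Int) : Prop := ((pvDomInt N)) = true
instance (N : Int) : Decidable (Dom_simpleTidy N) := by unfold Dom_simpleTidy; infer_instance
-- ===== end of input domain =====

-- B replaces A's single right-to-left running-minimum pass by a per-position suffix-minimum
-- nested scan with left-to-right Horner reconstruction (alternative decomposition, not faster).

-- ===== PORT A =====
-- Python min(a, b) on one-character strings: b if b < a else a
def pyMinC (a b : Char) : Char := if b < a then b else a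
-- int(c) for a one-character string; the `none` (ValueError) case is excluded by Pre_
def intC (c : Char) : Int := (PySem.Int.ofChars? [c]).getD 0

def simpleTidy (N : Int) : Int :=
  let digits := PySem.Int.toChars N
  let r := (PySem.List.pyRange 0 (digits.length : Int) 1).foldl
    (fun (st : Char × Int) i =>
      let j := (digits.length : Int) - 1 - i
      let largestPossible := pyMinC st.1 (PySem.List.pyGetD digits j 'x')
      (largestPossible, st.2 + intC largestPossible * 10 ^ i.toNat))
    ('9', 0)
  r.2

-- ===== PORT B =====
def simpleTidy_alt (N : Int) : Int :=
  let digits := PySem.Int.toChars N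
  (PySem.List.pyRange 0 (digits.length : Int) 1).foldl
    (fun total j =>
      let m := (PySem.List.pyRange (j + 1) (digits.length : Int) 1).foldl
        (fun m k =>
          let c := PySem.List.pyGetD digits k 'x'
          if c < m then c else m)
        (PySem.List.pyGetD digits j 'x')
      total * 10 + intC m)
    0

-- ===== PRECONDITION & SPEC =====
-- For N < 0 the character '-' sorts below every digit, becomes the running minimum,
-- and int('-') raises ValueError in A (and in B alike); Pre_ excludes exactly those inputs.
def Pre_simpleTidy (N : Int) : Prop := 0 ≤ N
instance (N : Int) : Decidable (Pre_simpleTidy N) := by unfold Pre_simpleTidy; infer_instance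
def pvWitness_simpleTidy : Int := 132

def Spec_simpleTidy (N : Int) (out : Int) : Prop := out = simpleTidy_alt N
instance (N : Int) (out : Int) : Decidable (Spec_simpleTidy N out) := by unfold Spec_simpleTidy; infer_instance

-- ===== CLAIM (what is proved, stated in full; the proofs are below) =====
def Claim_equal_simpleTidy : Prop := ∀ (N : Int), Dom_simpleTidy N → Pre_simpleTidy N → Spec_simpleTidy N (simpleTidy N)

-- ===== LEMMAS AND PROOFS =====

lemma pyMinC_eq_min (a b : Char) : pyMinC a b = min a b := by
  unfold pyMinC
  rcases lt_or_ge b a with h | h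
  · simp [h, min_eq_right h.le]
  · simp [not_lt.mpr h, min_eq_left h]

lemma pyGetD_cons_succ {α : Type} (x : α) (xs : List α) (i : Int) (d : α)
    (h0 : 0 ≤ i) (h1 : i < (xs.length : Int)) :
    PySem.List.pyGetD (x :: xs) (i + 1) d = PySem.List.pyGetD xs i d := by
  rw [PySem.List.pyGetD_eq_getElem (x :: xs) d (by omega) (by simp; omega),
      PySem.List.pyGetD_eq_getElem xs d h0 h1]
  have ht : (i + 1).toNat = i.toNat + 1 := by omega
  simp [ht]

/-- Shift a fold over `range(a+1, b+1)` to a fold over `range(a, b)`. -/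
lemma foldl_pyRange_shift {β : Type} (a b : Int) (f g : β → Int → β)
    (h : ∀ acc i, a ≤ i → i < b → f acc (i + 1) = g acc i) (init : β) :
    (PySem.List.pyRange (a + 1) (b + 1) 1).foldl f init
      = (PySem.List.pyRange a b 1).foldl g init := by
  rw [PySem.List.pyRange_one (a + 1) (b + 1), PySem.List.pyRange_one a b,
      show b + 1 - (a + 1) = b - a by ring, List.foldl_map, List.foldl_map]
  apply PySem.List.foldl_congr_mem
  intro acc k hk
  have hk' : (k : Int) < b - a := by
    have := List.mem_range.mp hk
    omega
  have hk0 : (0 : Int) ≤ (k : Int) := by positivity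
  calc f acc (a + 1 + (k : Int)) = f acc ((a + (k : Int)) + 1) := by ring_nf
    _ = g acc (a + (k : Int)) := h acc _ (by omega) (by omega)

-- the suffix minimum of a list of characters, seeded with A's sentinel '9'
def sufminC : List Char → Char
  | [] => '9'
  | c :: t => pyMinC c (sufminC t)

-- the tidy value: for each position, int(suffix minimum) times the place value
def valC : List Char → Int
  | [] => 0
  | c :: t => intC (sufminC (c :: t)) * 10 ^ t.length + valC t

lemma foldl_min_eq (t : List Char) : ∀ c : Char, c ≤ '9' → (∀ x ∈ t, x ≤ '9') →
    t.foldl (fun m x => if x < m then x else m) c = pyMinC c (sufminC t) := by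
  induction t with
  | nil => intro c hc _; simp [sufminC, pyMinC_eq_min, min_eq_left hc]
  | cons x t ih =>
    intro c hc hall
    have hx : x ≤ '9' := hall x (by simp)
    have h1 : (if x < c then x else c) = min c x := by rw [← pyMinC_eq_min]; rfl
    calc (x :: t).foldl (fun m x => if x < m then x else m) c
        = t.foldl (fun m x => if x < m then x else m) (min c x) := by
          simp [List.foldl_cons, h1]
      _ = pyMinC (min c x) (sufminC t) := ih (min c x)
          (le_trans (min_le_left _ _) hc) (fun y hy => hall y (by simp [hy]))
      _ = pyMinC c (sufminC (x :: t)) := by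
          simp only [sufminC, pyMinC_eq_min, min_assoc]

lemma loopA_eq (ds : List Char) :
    ((PySem.List.pyRange 0 (ds.length : Int) 1).foldl
      (fun (st : Char × Int) i =>
        let j := (ds.length : Int) - 1 - i
        let largestPossible := pyMinC st.1 (PySem.List.pyGetD ds j 'x')
        (largestPossible, st.2 + intC largestPossible * 10 ^ i.toNat))
      ('9', 0))
    = (sufminC ds, valC ds) := by
  induction ds with
  | nil => simp [PySem.List.pyRange_one_eq_nil, sufminC, valC]
  | cons c t ih =>
    have hlen : ((c :: t).length : Int) = (t.length : Int) + 1 := by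
      simp [List.length_cons]
    rw [hlen, PySem.List.pyRange_one_succ_right (by positivity), List.foldl_append]
    have hcong :
        (PySem.List.pyRange 0 (t.length : Int) 1).foldl
          (fun (st : Char × Int) i =>
            let j := (t.length : Int) + 1 - 1 - i
            let largestPossible := pyMinC st.1 (PySem.List.pyGetD (c :: t) j 'x')
            (largestPossible, st.2 + intC largestPossible * 10 ^ i.toNat))
          ('9', 0)
        = (PySem.List.pyRange 0 (t.length : Int) 1).foldl
          (fun (st : Char × Int) i =>
            let j := (t.length : Int) - 1 - i
            let largestPossible := pyMinC st.1 (PySem.List.pyGetD t j 'x')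
            (largestPossible, st.2 + intC largestPossible * 10 ^ i.toNat))
          ('9', 0) := by
      apply PySem.List.foldl_congr_mem
      intro st i hi
      have hi' := (PySem.List.mem_pyRange_one).mp hi
      have hj : (t.length : Int) + 1 - 1 - i = ((t.length : Int) - 1 - i) + 1 := by ring
      simp only [hj, pyGetD_cons_succ c t ((t.length : Int) - 1 - i) 'x' (by omega) (by omega)]
    rw [hcong, ih]
    simp only [List.foldl_cons, List.foldl_nil]
    have hj0 : (t.length : Int) + 1 - 1 - (t.length : Int) = 0 := by ring
    rw [hj0, PySem.List.pyGetD_zero_cons]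
    have hm : pyMinC (sufminC t) c = sufminC (c :: t) := by
      simp only [sufminC, pyMinC_eq_min, min_comm]
    have hpow : ((t.length : Int)).toNat = t.length := by omega
    rw [hm, hpow]
    show (sufminC (c :: t), valC t + intC (sufminC (c :: t)) * 10 ^ t.length)
        = (sufminC (c :: t), valC (c :: t))
    simp only [valC]
    rw [add_comm]

lemma loopB_eq (ds : List Char) (hall : ∀ x ∈ ds, x ≤ '9') : ∀ acc : Int,
    (PySem.List.pyRange 0 (ds.length : Int) 1).foldl
      (fun total j =>
        let m := (PySem.List.pyRange (j + 1) (ds.length : Int) 1).foldl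
          (fun m k =>
            let c := PySem.List.pyGetD ds k 'x'
            if c < m then c else m)
          (PySem.List.pyGetD ds j 'x')
        total * 10 + intC m) acc
    = acc * 10 ^ ds.length + valC ds := by
  induction ds with
  | nil => intro acc; simp [PySem.List.pyRange_one_eq_nil, valC]
  | cons c t ih =>
    intro acc
    have hallt : ∀ x ∈ t, x ≤ '9' := fun x hx => hall x (by simp [hx])
    have hc9 : c ≤ '9' := hall c (by simp)
    have hlen : ((c :: t).length : Int) = (t.length : Int) + 1 := by
      simp [List.length_cons]
    -- the first iteration (j = 0) computes the suffix minimum of the whole list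
    have hinner0 :
        (PySem.List.pyRange (0 + 1) ((c :: t).length : Int) 1).foldl
          (fun m k =>
            let cc := PySem.List.pyGetD (c :: t) k 'x'
            if cc < m then cc else m)
          (PySem.List.pyGetD (c :: t) 0 'x')
        = sufminC (c :: t) := by
      rw [PySem.List.pyGetD_zero_cons,
          PySem.List.foldl_pyRange_pyGetD' (c :: t) 'x'
            (fun m cc => if cc < m then cc else m) c (by omega)]
      show (List.drop (1 : Int).toNat (c :: t)).foldl
          (fun m x => if x < m then x else m) c = sufminC (c :: t)
      rw [show (1 : Int).toNat = 1 from rfl, List.drop_succ_cons, List.drop_zero]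
      exact foldl_min_eq t c hc9 hallt
    rw [PySem.List.pyRange_one_cons (by rw [hlen]; omega)]
    simp only [List.foldl_cons]
    rw [hinner0]
    -- the remaining iterations are exactly B's loop on the tail
    have hshift :
        (PySem.List.pyRange (0 + 1) ((c :: t).length : Int) 1).foldl
          (fun total j =>
            let m := (PySem.List.pyRange (j + 1) ((c :: t).length : Int) 1).foldl
              (fun m k =>
                let cc := PySem.List.pyGetD (c :: t) k 'x'
                if cc < m then cc else m)
              (PySem.List.pyGetD (c :: t) j 'x')
            total * 10 + intC m)
          (acc * 10 + intC (sufminC (c :: t)))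
        = (PySem.List.pyRange 0 (t.length : Int) 1).foldl
          (fun total j =>
            let m := (PySem.List.pyRange (j + 1) (t.length : Int) 1).foldl
              (fun m k =>
                let cc := PySem.List.pyGetD t k 'x'
                if cc < m then cc else m)
              (PySem.List.pyGetD t j 'x')
            total * 10 + intC m)
          (acc * 10 + intC (sufminC (c :: t))) := by
      rw [hlen]
      apply foldl_pyRange_shift
      intro acc' j hj0 hjlt
      have hinner :
          (PySem.List.pyRange (j + 1 + 1) ((t.length : Int) + 1) 1).foldl
            (fun m k =>
              let cc := PySem.List.pyGetD (c :: t) k 'x'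
              if cc < m then cc else m)
            (PySem.List.pyGetD (c :: t) (j + 1) 'x')
          = (PySem.List.pyRange (j + 1) (t.length : Int) 1).foldl
            (fun m k =>
              let cc := PySem.List.pyGetD t k 'x'
              if cc < m then cc else m)
            (PySem.List.pyGetD t j 'x') := by
        rw [pyGetD_cons_succ c t j 'x' hj0 hjlt]
        apply foldl_pyRange_shift
        intro m k hk0 hklt
        rw [pyGetD_cons_succ c t k 'x' (by omega) (by omega)]
      simp only [hinner]
    rw [hshift, ih hallt (acc * 10 + intC (sufminC (c :: t)))]
    show (acc * 10 + intC (sufminC (c :: t))) * 10 ^ t.length + valC t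
        = acc * 10 ^ (c :: t).length + valC (c :: t)
    simp only [valC, List.length_cons, pow_succ]
    ring

lemma toDigitsCore_le_nine : ∀ (fuel n : Nat) (ds : List Char),
    (∀ c ∈ ds, c ≤ '9') → ∀ c ∈ Nat.toDigitsCore 10 fuel n ds, c ≤ '9' := by
  have hdig : ∀ m : Nat, m < 10 → Nat.digitChar m ≤ '9' := by decide
  intro fuel
  induction fuel with
  | zero => intro n ds hds; simpa [Nat.toDigitsCore] using hds
  | succ fuel ih =>
    intro n ds hds c hc
    rw [Nat.toDigitsCore] at hc
    have hcons : ∀ x ∈ Nat.digitChar (n % 10) :: ds, x ≤ '9' := by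
      intro x hx
      rcases List.mem_cons.mp hx with h | h
      · subst h; exact hdig _ (Nat.mod_lt _ (by omega))
      · exact hds x h
    by_cases h : n / 10 = 0
    · rw [if_pos h] at hc; exact hcons c hc
    · rw [if_neg h] at hc; exact ih (n / 10) _ hcons c hc

lemma toChars_le_nine (N : Int) (hN : 0 ≤ N) :
    ∀ c ∈ PySem.Int.toChars N, c ≤ '9' := by
  unfold PySem.Int.toChars
  rw [if_neg (by omega)]
  exact toDigitsCore_le_nine _ _ [] (by simp)

-- ===== VERDICT (by name: the statement is the Claim_ definition above) =====
theorem simpleTidy_spec : Claim_equal_simpleTidy := by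
  intro N _ hPre
  unfold Spec_simpleTidy simpleTidy simpleTidy_alt
  simp only []
  rw [loopA_eq (PySem.Int.toChars N),
      loopB_eq (PySem.Int.toChars N) (toChars_le_nine N hPre) 0]
  simp
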